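-- pv_equiv track=rewrite | github.com/teyandeymain1/01-python-codes | 01_codes/01_競プロ用/01_PythonCodesLibrary/試作/search_linearly.py | search_linear_func
-- ===== SOURCE A (Python) =====
-- def search_linear_func(list):
--
--     answer = 100000000000000000000000000000000000000000000000000000000000000000000000 #--答えの初期値を左に書く--
--
--     for i in range(len(list)):
--         answerTmp = 0      #答えの候補を保存するための変数
--         swich = 0          #探索を止めるための変数
--         while swich == 0:  #swich = 0の間は探索を続行
--
--             #------------------探索を続ける条件を下に書く-----------------
--             if (list[i] % 2) == 0:
--                 list[i] = list[i] // 2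
--                 answerTmp += 1
--             #----------------------ここまで-----------------------------
--
--             else:
--                 swich = 1 #swich = 1 として探索を止める
--
--         if answerTmp < answer: #--答えの候補を保存する条件を左に書く--
--
--             answer = answerTmp
--     return answer #答えを返す
-- ===== SOURCE B (Python) =====
-- def search_linear_func(list):
--
--     answer = 100000000000000000000000000000000000000000000000000000000000000000000000
--
--     for i in range(len(list)):
--         x = list[i]
--         tz = (x & -x).bit_length() - 1   # trailing factors of 2, closed form
--         list[i] = x >> tz                # same in-place reduction to the odd part as A
--         if tz < answer:
--             answer = tz
--     return answer
-- ===== Notes on version B (the rewrite author's own statement) =====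
-- stated objective: idiomatic
-- what changed: The inner while-loop that repeatedly tests divisibility and halves each element is replaced by a closed-form bit computation tz = (x & -x).bit_length() - 1 and a single shift, removing the per-element division loop; the empty-list sentinel and the in-place mutation to the odd part are preserved.
-- outside the precondition, e.g. on search_linear_func([0]): A does not finish within the time limit, B raises ValueError
import Mathlib
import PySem

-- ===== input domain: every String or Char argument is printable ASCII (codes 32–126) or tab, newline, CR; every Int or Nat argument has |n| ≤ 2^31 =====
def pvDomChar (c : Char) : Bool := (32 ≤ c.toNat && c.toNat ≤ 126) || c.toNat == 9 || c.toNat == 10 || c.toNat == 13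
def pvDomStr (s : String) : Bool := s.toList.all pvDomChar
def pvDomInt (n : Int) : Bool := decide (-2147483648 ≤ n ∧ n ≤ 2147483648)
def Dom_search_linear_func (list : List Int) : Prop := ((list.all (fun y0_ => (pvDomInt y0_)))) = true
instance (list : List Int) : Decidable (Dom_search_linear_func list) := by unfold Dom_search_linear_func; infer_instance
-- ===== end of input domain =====

-- B replaces A's per-element halving loop by the closed-form bit trick tz = (x & -x).bit_length() - 1 (idiomatic).
-- Both Pythons mutate the argument list in place to the odd parts of its elements (identically); the equivalence
-- proved here is about the RETURN value only.

-- ===== PORT A =====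
-- A's inner 'while swich == 0' loop: keeps halving list[i] while it is even, counting the steps.
-- The fuel |x|+1 is enough for every x ≠ 0 (Pre_ excludes 0, on which the Python loop never terminates);
-- only list[i] itself is read and written in iteration i, so the for-loop is a fold over the elements.
def countA (fuel : Nat) (x : Int) (answerTmp : Int) : Int :=
  match fuel with
  | 0 => answerTmp
  | f + 1 =>
    if PySem.Int.mod x 2 = 0 then countA f (PySem.Int.floordiv x 2) (answerTmp + 1)
    else answerTmp

def search_linear_func (list : List Int) : Int :=
  list.foldl
    (fun answer x =>
      let answerTmp := countA (x.natAbs + 1) x 0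
      if answerTmp < answer then answerTmp else answer)
    100000000000000000000000000000000000000000000000000000000000000000000000

-- ===== PORT B =====
-- tz = (x & -x).bit_length() - 1 of Source B (the in-place write list[i] = x >> tz does not affect the return value).
def tzOf (x : Int) : Int := (PySem.Int.bitLength (PySem.Int.band x (-x)) : Int) - 1

def search_linear_func_alt (list : List Int) : Int :=
  list.foldl
    (fun answer x =>
      let tz := tzOf x
      if tz < answer then tz else answer)
    100000000000000000000000000000000000000000000000000000000000000000000000

-- ===== PRECONDITION & SPEC =====
-- Pre_ excludes lists containing 0: there A's while-loop never terminates (0 % 2 == 0 and 0 // 2 == 0 forever),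
-- so A returns on exactly the lists Pre_ admits.
def Pre_search_linear_func (list : List Int) : Prop := ∀ x ∈ list, x ≠ 0
instance (list : List Int) : Decidable (Pre_search_linear_func list) := by unfold Pre_search_linear_func; infer_instance
def pvWitness_search_linear_func : List Int := ([12, 8, -6, 7])

def Spec_search_linear_func (list : List Int) (out : Int) : Prop := out = search_linear_func_alt list
instance (list : List Int) (out : Int) : Decidable (Spec_search_linear_func list out) := by unfold Spec_search_linear_func; infer_instance

-- ===== CLAIM (what is proved, stated in full; the proofs are below) =====
def Claim_equal_search_linear_func : Prop := ∀ (list : List Int), Dom_search_linear_func list → Pre_search_linear_func list → Spec_search_linear_func list (search_linear_func list)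

-- ===== LEMMAS AND PROOFS =====

-- (2k+1) &&& 2k = 2k and 2m &&& (2m-1) = 2*(m &&& (m-1)): one step of the low-bit recursion.
theorem bit_odd (k : Nat) : (2*k+1) &&& (2*k) = 2*k := by
  have := Nat.land_bit true k false k
  simpa [Nat.bit] using this

theorem bit_even (m : Nat) (hm : 0 < m) : (2*m) &&& (2*m - 1) = 2*(m &&& (m-1)) := by
  have h1 : 2*m - 1 = 2*(m-1)+1 := by omega
  have := Nat.land_bit false m true (m-1)
  rw [h1]
  simpa [Nat.bit] using this

-- Python's x & -x, computed on |x|: both sign cases of PySem.Int.band reduce to n - (n &&& (n-1)).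
theorem band_self_neg (x : Int) :
    PySem.Int.band x (-x) = ((x.natAbs - (x.natAbs &&& (x.natAbs - 1)) : Nat) : Int) := by
  rcases lt_trichotomy x 0 with h | h | h
  · simp only [PySem.Int.band]
    rw [if_neg (by omega), if_pos (by omega)]
    congr 2 <;> [skip; congr 1] <;> omega
  · subst h; decide
  · simp only [PySem.Int.band]
    rw [if_pos (by omega), if_neg (by omega)]
    congr 2 <;> [skip; congr 1] <;> omega

theorem low_pos (n : Nat) (hn : 0 < n) : 0 < n - (n &&& (n-1)) := by
  have := Nat.and_le_right (n := n) (m := n - 1)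
  omega

theorem tz_odd (x : Int) (h : x.natAbs % 2 = 1) : tzOf x = 0 := by
  obtain ⟨k, hk⟩ : ∃ k, x.natAbs = 2*k+1 := ⟨x.natAbs / 2, by omega⟩
  unfold tzOf
  rw [band_self_neg, hk]
  have : 2*k+1 - 1 = 2*k := by omega
  rw [this, bit_odd]
  have : 2*k+1 - 2*k = 1 := by omega
  rw [this]
  decide

theorem tz_even (y : Int) (hy : y ≠ 0) : tzOf (2*y) = tzOf y + 1 := by
  unfold tzOf
  rw [band_self_neg, band_self_neg]
  have hn0' : 0 < y.natAbs := Int.natAbs_pos.mpr hy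
  obtain ⟨n, hn⟩ : ∃ n, y.natAbs = n := ⟨_, rfl⟩
  rw [hn] at hn0' ⊢
  have hn0 : 0 < n := hn0'
  have habs : (2*y).natAbs = 2*n := by rw [Int.natAbs_mul, hn]; rfl
  rw [habs, bit_even n hn0]
  have hlow : 0 < n - (n &&& (n-1)) := low_pos n hn0
  have h2 : (2*n) - 2*(n &&& (n-1)) = 2*(n - (n &&& (n-1))) := by
    have := Nat.and_le_right (n := n) (m := n - 1); omega
  rw [h2]
  have := PySem.Int.bitLength_natCast (m := 2*(n - (n &&& (n-1)))) (by omega)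
  rw [this]
  have : 2*(n - (n &&& (n-1))) / 2 = n - (n &&& (n-1)) := by omega
  rw [this]
  push_cast
  ring

-- A's inner loop computes acc + (trailing-2 count of x) = acc + tzOf x once the fuel covers |x|.
theorem countA_eq (fuel : Nat) : ∀ (x : Int), x ≠ 0 → x.natAbs ≤ fuel → ∀ acc,
    countA fuel x acc = acc + tzOf x := by
  induction fuel with
  | zero => intro x hx hle acc; omega
  | succ f ih =>
    intro x hx hle acc
    unfold countA
    by_cases h : PySem.Int.mod x 2 = 0
    · rw [if_pos h]
      have hdvd : (2:Int) ∣ x := (PySem.Int.mod_eq_zero_iff_dvd x 2).mp h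
      obtain ⟨y, hy⟩ := hdvd
      have hy0 : y ≠ 0 := by rintro rfl; simp at hy; omega
      have hfd : PySem.Int.floordiv x 2 = y := by
        rw [PySem.Int.floordiv_eq_ediv_of_pos (by omega), hy, Int.mul_ediv_cancel_left _ (by omega)]
      rw [hfd]
      have hyabs : y.natAbs ≤ f := by
        have : x.natAbs = 2 * y.natAbs := by rw [hy, Int.natAbs_mul]; rfl
        omega
      rw [ih y hy0 hyabs (acc+1), hy, tz_even y hy0]
      ring
    · rw [if_neg h]
      have hmod : PySem.Int.mod x 2 = Int.emod x 2 := PySem.Int.mod_eq_emod_of_pos (by omega : (0:Int) < 2)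
      have : x.natAbs % 2 = 1 := by
        rw [hmod] at h
        have h2 : ¬ (x % 2 = 0) := h
        omega
      rw [tz_odd x this]; ring

-- ===== VERDICT (by name: the statement is the Claim_ definition above) =====
theorem search_linear_func_spec : Claim_equal_search_linear_func := by
  intro list _ hpre
  unfold Spec_search_linear_func search_linear_func search_linear_func_alt
  apply PySem.List.foldl_congr_mem
  intro acc x hx
  have hx0 : x ≠ 0 := hpre x hx
  simp only [countA_eq (x.natAbs + 1) x hx0 (by omega) 0, zero_add]
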